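-- pv_equiv track=rewrite | github.com/blzzua/codewars | 6-kyu/lotto_6_aus_49_6_of_49.py | check_for_winning_category
-- ===== SOURCE A (Python) =====
-- def check_for_winning_category(your_numbers, winning_numbers):
--     my_numbers, my_winning_numbers = your_numbers[:], winning_numbers[:]
--     superzahl = (my_winning_numbers.pop() ==  my_numbers.pop())
--     numbers = sum(bool(i in my_winning_numbers) for i in my_numbers)
--     match numbers, superzahl:
--         case 6, True : return 1
--         case 6, False: return 2
--         case 5, True : return 3
--         case 5, False: return 4
--         case 4, True : return 5
--         case 4, False: return 6
--         case 3, True : return 7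
--         case 3, False: return 8
--         case 2, True : return 9
--         case _: return -1
-- ===== SOURCE B (Python) =====
-- def check_for_winning_category(your_numbers, winning_numbers):
--     superzahl = your_numbers[-1] == winning_numbers[-1]
--     counts = {}
--     for v in your_numbers[:-1]:
--         counts[v] = counts.get(v, 0) + 1
--     numbers = 0
--     seen = set()
--     for v in winning_numbers[:-1]:
--         if v not in seen:
--             seen.add(v)
--             numbers += counts.get(v, 0)
--     if 3 <= numbers <= 6 or (numbers == 2 and superzahl):
--         return 2 * (6 - numbers) + (1 if superzahl else 2)
--     return -1
-- ===== Notes on version B (the rewrite author's own statement) =====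
-- stated objective: faster
-- what changed: Replaces A's per-element membership scan of the pool (and its ten-case match table) by the reverse traversal: build a count dictionary of your numbers once, then scan the winning pool's distinct values summing those counts, mapping the count to the category with a closed-form arithmetic formula instead of the case table.
import Mathlib
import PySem

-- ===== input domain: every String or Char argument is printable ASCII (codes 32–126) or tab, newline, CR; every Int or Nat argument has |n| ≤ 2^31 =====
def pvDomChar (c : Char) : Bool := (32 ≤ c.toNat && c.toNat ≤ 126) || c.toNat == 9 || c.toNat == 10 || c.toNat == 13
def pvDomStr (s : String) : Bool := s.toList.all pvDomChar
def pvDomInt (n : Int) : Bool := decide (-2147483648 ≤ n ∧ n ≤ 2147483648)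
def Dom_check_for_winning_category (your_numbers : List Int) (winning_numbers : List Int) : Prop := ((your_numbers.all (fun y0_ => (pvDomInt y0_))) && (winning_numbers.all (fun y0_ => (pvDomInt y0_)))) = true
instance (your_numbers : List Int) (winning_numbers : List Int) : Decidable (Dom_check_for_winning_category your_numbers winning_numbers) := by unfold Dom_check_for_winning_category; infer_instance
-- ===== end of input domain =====

-- B replaces A's per-element membership scan and ten-case match table by a count
-- dictionary of your numbers, a dedup scan over the winning pool summing those counts,
-- and a closed-form category formula (objective: faster, O(n+m) instead of O(n*m)).


-- ===== PORT A =====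
def check_for_winning_category (your_numbers : List Int) (winning_numbers : List Int) : Int :=
  -- my_numbers, my_winning_numbers = your_numbers[:], winning_numbers[:]  (copies)
  match PySem.List.pop? winning_numbers, PySem.List.pop? your_numbers with
  | some (w, my_winning_numbers), some (y, my_numbers) =>
    let superzahl := w == y
    -- numbers = sum(bool(i in my_winning_numbers) for i in my_numbers)
    let numbers : Int :=
      my_numbers.foldl (fun acc i => acc + (if my_winning_numbers.contains i then 1 else 0)) 0
    -- match numbers, superzahl: ... (the ten cases, in order)
    if numbers == 6 && superzahl then 1
    else if numbers == 6 && !superzahl then 2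
    else if numbers == 5 && superzahl then 3
    else if numbers == 5 && !superzahl then 4
    else if numbers == 4 && superzahl then 5
    else if numbers == 4 && !superzahl then 6
    else if numbers == 3 && superzahl then 7
    else if numbers == 3 && !superzahl then 8
    else if numbers == 2 && superzahl then 9
    else -1
  | _, _ => -1  -- IndexError (empty list .pop()); excluded by Pre_

-- ===== PORT B =====
def check_for_winning_category_alt (your_numbers : List Int) (winning_numbers : List Int) : Int :=
  match PySem.List.pyGet? your_numbers (-1) with
  | none => -1  -- IndexError; excluded by Pre_
  | some a =>
    match PySem.List.pyGet? winning_numbers (-1) with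
    | none => -1  -- IndexError; excluded by Pre_
    | some b =>
    let superzahl := a == b
    -- counts = {}; for v in your_numbers[:-1]: counts[v] = counts.get(v, 0) + 1
    let counts : PySem.Dict Int Int :=
      (PySem.List.slice your_numbers none (some (-1))).foldl
        (fun d v => d.insert v (d.getD v 0 + 1)) PySem.Dict.empty
    -- numbers = 0; seen = set(); for v in winning_numbers[:-1]: if v not in seen: ...
    let st :=
      (PySem.List.slice winning_numbers none (some (-1))).foldl
        (fun (st : PySem.Set Int × Int) v =>
          if PySem.Set.contains st.1 v then st
          else (PySem.Set.add st.1 v, st.2 + counts.getD v 0))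
        (PySem.Set.empty, 0)
    let numbers : Int := st.2
    if (3 ≤ numbers && numbers ≤ 6) || (numbers == 2 && superzahl) then
      2 * (6 - numbers) + (if superzahl then 1 else 2)
    else -1

-- ===== PRECONDITION & SPEC =====
-- Pre_ excludes exactly the inputs on which A raises IndexError (an empty list popped).
def Pre_check_for_winning_category (your_numbers : List Int) (winning_numbers : List Int) : Prop :=
  your_numbers ≠ [] ∧ winning_numbers ≠ []
instance (your_numbers : List Int) (winning_numbers : List Int) : Decidable (Pre_check_for_winning_category your_numbers winning_numbers) := by unfold Pre_check_for_winning_category; infer_instance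
def pvWitness_check_for_winning_category : List Int × List Int := ([1, 2, 3, 4, 5, 6], [1, 2, 3, 9, 10, 6])
def Spec_check_for_winning_category (your_numbers : List Int) (winning_numbers : List Int) (out : Int) : Prop := out = check_for_winning_category_alt your_numbers winning_numbers
instance (your_numbers : List Int) (winning_numbers : List Int) (out : Int) : Decidable (Spec_check_for_winning_category your_numbers winning_numbers out) := by unfold Spec_check_for_winning_category; infer_instance

-- ===== CLAIM (what is proved, stated in full; the proofs are below) =====
def Claim_equal_check_for_winning_category : Prop := ∀ (your_numbers : List Int) (winning_numbers : List Int), Dom_check_for_winning_category your_numbers winning_numbers → Pre_check_for_winning_category your_numbers winning_numbers → Spec_check_for_winning_category your_numbers winning_numbers (check_for_winning_category your_numbers winning_numbers)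

-- ===== LEMMAS AND PROOFS =====

-- A's running sum of membership booleans equals the membership-filter length.
theorem pv_count_eq (l pool : List Int) (s : Int) :
    l.foldl (fun acc i => acc + (if pool.contains i then 1 else 0)) s
      = s + ((l.filter (fun i => pool.contains i)).length : Int) := by
  induction l generalizing s with
  | nil => simp
  | cons x xs ih =>
    simp only [List.foldl_cons, List.filter_cons]
    rw [ih]
    by_cases h : x ∈ pool
    · simp [h]; ring
    · simp [h]

theorem pv_split (my : List Int) (v : Int) (rs s : List Int) (hv : s.contains v = false) :
    (my.filter (fun i => (v :: rs).contains i && !s.contains i)).length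
      = my.count v
        + (my.filter (fun i => rs.contains i && !((s ++ [v]).contains i))).length := by
  have hv' : v ∉ s := by simpa using hv
  induction my with
  | nil => simp
  | cons x xs ih =>
    rw [List.filter_cons, List.filter_cons, List.count_cons]
    by_cases h : x = v
    · subst h
      have hp : ((x :: rs).contains x && !s.contains x) = true := by simp [hv']
      have hq : (rs.contains x && !((s ++ [x]).contains x)) = false := by simp
      rw [hp, hq]
      simp only [List.length_cons, beq_self_eq_true, if_true, Bool.false_eq_true, if_false]
      omega
    · have hvx : (x == v) = false := by simp [h]
      have hpq : ((v :: rs).contains x && !s.contains x)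
          = (rs.contains x && !((s ++ [v]).contains x)) := by
        simp [h]
      rw [hpq, hvx]
      cases hc : (rs.contains x && !((s ++ [v]).contains x)) <;>
        simp only [List.length_cons, if_true, Bool.false_eq_true, if_false] <;> omega

theorem pv_scan (counts : PySem.Dict Int Int) (my : List Int)
    (hc : ∀ v, counts.getD v 0 = (my.count v : Int))
    (pool : List Int) (s : List Int) (a : Int) :
    (pool.foldl
        (fun (st : PySem.Set Int × Int) v =>
          if PySem.Set.contains st.1 v then st
          else (PySem.Set.add st.1 v, st.2 + counts.getD v 0)) (s, a)).2
      = a + ((my.filter (fun i => pool.contains i && !s.contains i)).length : Int) := by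
  induction pool generalizing s a with
  | nil => simp
  | cons v rs ih =>
    simp only [List.foldl_cons]
    by_cases hv : PySem.Set.contains s v = true
    · rw [if_pos hv]
      rw [ih s a]
      have heq : List.filter (fun i => (v :: rs).contains i && !s.contains i) my
          = List.filter (fun i => rs.contains i && !s.contains i) my := by
        apply List.filter_congr
        intro i _
        by_cases hiv : i = v
        · subst hiv
          have hm : i ∈ s := by
            simpa [PySem.Set.contains] using hv
          simp [hm]
        · simp [hiv]
      rw [heq]
    · rw [if_neg hv]
      have hv' : s.contains v = false := by
        simpa [PySem.Set.contains] using hv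
      have hm : v ∉ s := by simpa using hv'
      have hadd : PySem.Set.add s v = s ++ [v] := by
        simp [PySem.Set.add, PySem.Set.contains, hm]
      rw [ih]
      rw [hadd, hc v, pv_split my v rs s hv']
      push_cast
      ring

theorem pv_table (n : Int) (sz : Bool) :
    (if n == 6 && sz then (1 : Int)
     else if n == 6 && !sz then 2
     else if n == 5 && sz then 3
     else if n == 5 && !sz then 4
     else if n == 4 && sz then 5
     else if n == 4 && !sz then 6
     else if n == 3 && sz then 7
     else if n == 3 && !sz then 8
     else if n == 2 && sz then 9
     else -1)
      = (if (3 ≤ n && n ≤ 6) || (n == 2 && sz) then 2 * (6 - n) + (if sz then 1 else 2)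
         else -1) := by
  cases sz <;> simp only [Bool.and_true, Bool.and_false, Bool.not_true, Bool.not_false,
    beq_iff_eq, decide_eq_true_eq, Bool.and_eq_true, Bool.or_eq_true, Bool.false_eq_true,
    if_false, or_false, if_true] <;> split_ifs <;> omega

-- ===== VERDICT =====
theorem check_for_winning_category_spec : Claim_equal_check_for_winning_category := by
  unfold Claim_equal_check_for_winning_category
  intro yn wn _ hpre
  obtain ⟨hy, hw⟩ := hpre
  rcases yn.eq_nil_or_concat with rfl | ⟨my, y, rfl⟩
  · exact absurd rfl hy
  rcases wn.eq_nil_or_concat with rfl | ⟨mw, w, rfl⟩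
  · exact absurd rfl hw
  unfold Spec_check_for_winning_category check_for_winning_category check_for_winning_category_alt
  simp only [List.concat_eq_append]
  rw [PySem.List.pop?_last, PySem.List.pop?_last,
      PySem.List.pyGet?_neg_one_append_singleton, PySem.List.pyGet?_neg_one_append_singleton]
  simp only [PySem.List.slice_to_neg_one, List.dropLast_concat]
  rw [pv_count_eq, zero_add]
  rw [pv_scan _ my (fun v => by
        rw [PySem.Dict.getD_foldl_insert_add_one]
        simp [PySem.Dict.getD_empty]) mw PySem.Set.empty 0]
  rw [zero_add]
  have hfe : (my.filter (fun i => mw.contains i && !(List.contains (PySem.Set.empty : List Int) i)))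
      = my.filter (fun i => mw.contains i) := by
    apply List.filter_congr
    intro i _
    simp [PySem.Set.empty]
  rw [hfe]
  rw [show (w == y) = (y == w) from by simp [Bool.beq_comm]]
  exact pv_table _ _
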